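-- pv_equiv track=rewrite | github.com/mateuszsury/microredis | microredis/commands/hyperloglog.py | _count_leading_zeros
-- ===== SOURCE A (Python) =====
-- def _count_leading_zeros(value: int, bits: int = 18) -> int:
--     """
--     Count leading zeros in the lower 'bits' bits of value.
--
--     Args:
--         value: Integer to count zeros in
--         bits: Number of bits to consider (default 18 for 32-14=18 remaining)
--
--     Returns:
--         Count of leading zeros (0 to bits-1)
--     """
--     if value == 0:
--         return bits
--
--     count = 0
--     # Check from highest bit downward
--     mask = 1 << (bits - 1)
--     while count < bits and not (value & mask):
--         count += 1
--         mask >>= 1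
--     return count
-- ===== SOURCE B (Python) =====
-- def _count_leading_zeros(value: int, bits: int = 18) -> int:
--     masked = value % (1 << bits)
--     if masked == 0:
--         return bits
--     return bits - masked.bit_length()
-- ===== Notes on version B (the rewrite author's own statement) =====
-- stated objective: faster
-- what changed: Replaces the per-bit scanning while loop with a closed form: reduce value mod 2**bits and subtract the reduced value's bit_length from bits.
-- outside the precondition, e.g. on _count_leading_zeros(0, -5): A returns -5, B raises ValueError
import Mathlib
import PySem

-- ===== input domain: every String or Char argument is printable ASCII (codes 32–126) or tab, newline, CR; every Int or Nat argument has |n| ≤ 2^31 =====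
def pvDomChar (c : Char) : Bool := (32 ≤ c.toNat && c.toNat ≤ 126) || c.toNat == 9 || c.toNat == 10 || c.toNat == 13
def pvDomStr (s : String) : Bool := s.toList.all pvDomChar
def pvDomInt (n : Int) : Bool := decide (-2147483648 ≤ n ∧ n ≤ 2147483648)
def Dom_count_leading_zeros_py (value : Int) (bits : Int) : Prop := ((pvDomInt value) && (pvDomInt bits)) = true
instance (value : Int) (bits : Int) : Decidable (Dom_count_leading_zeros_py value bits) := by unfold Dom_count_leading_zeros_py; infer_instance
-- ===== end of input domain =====

-- B replaces A's per-bit scanning loop with a closed form (mask the low bits, subtract the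
-- masked value's bit length); equivalence is proved on Pre_ (bits ≥ 1, or value = 0 with bits ≥ 0).


-- ===== PORT A =====
-- A's while loop as fuel recursion; fuel = bits.toNat bounds the iteration count exactly
-- (each iteration increments count and the loop never passes count = bits).
def clzLoopA (value : Int) (bits : Int) : Int → Int → Nat → Int
  | count, _mask, 0 => count
  | count, mask, fuel+1 =>
    if count < bits ∧ Int.land value mask = 0 then
      clzLoopA value bits (count + 1) (mask >>> (1 : Int)) fuel
    else count

-- `1 << (bits - 1)` rendered as a Nat shift: exact for bits ≥ 1 (Python raises on a negative
-- shift there; Pre_ excludes that).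
def count_leading_zeros_py (value : Int) (bits : Int) : Int :=
  if value = 0 then bits
  else clzLoopA value bits 0 (((1 <<< (bits - 1).toNat : Nat) : Int)) bits.toNat

-- ===== PORT B =====
-- `1 << bits` rendered as a Nat shift (exact for bits ≥ 0, which Pre_ gives); `%` is Python's
-- floor mod (PySem.Int.mod); `masked` is ≥ 0 and nonzero in the else branch, where Python's
-- int.bit_length is exactly `Nat.log2 + 1` (ported so because Nat.log2 is the fast built-in).
def count_leading_zeros_py_alt (value : Int) (bits : Int) : Int :=
  let masked := PySem.Int.mod value ((1 <<< bits.toNat : Nat) : Int)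
  if masked = 0 then bits
  else bits - ((Nat.log2 masked.toNat + 1 : Nat) : Int)

-- ===== PRECONDITION & SPEC =====
-- Pre_ keeps the natural domain: bits ≥ 1, or value = 0 with bits = 0. Excluded: bits < 0
-- (outside the natural domain: A raises ValueError unless value == 0, where it returns the
-- meaningless negative count `bits` while B raises) and bits = 0 with value ≠ 0 (A raises
-- ValueError from computing 1 << -1, while B would return 0).
def Pre_count_leading_zeros_py (value : Int) (bits : Int) : Prop :=
  1 ≤ bits ∨ (value = 0 ∧ 0 ≤ bits)
instance (value : Int) (bits : Int) : Decidable (Pre_count_leading_zeros_py value bits) := by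
  unfold Pre_count_leading_zeros_py; infer_instance

def pvWitness_count_leading_zeros_py : Int × Int := (5, 3)

def Spec_count_leading_zeros_py (value : Int) (bits : Int) (out : Int) : Prop :=
  out = count_leading_zeros_py_alt value bits
instance (value : Int) (bits : Int) (out : Int) : Decidable (Spec_count_leading_zeros_py value bits out) := by
  unfold Spec_count_leading_zeros_py; infer_instance

-- ===== CLAIM (what is proved, stated in full; the proofs are below) =====
def Claim_equal_count_leading_zeros_py : Prop := ∀ (value : Int) (bits : Int), Dom_count_leading_zeros_py value bits → Pre_count_leading_zeros_py value bits → Spec_count_leading_zeros_py value bits (count_leading_zeros_py value bits)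


-- ===== LEMMAS AND PROOFS =====

lemma land_ofNat_exists (v : Int) (x : Nat) : ∃ m : Nat, Int.land v (Int.ofNat x) = Int.ofNat m := by
  cases v <;> exact ⟨_, rfl⟩

lemma testBit_ofNat (m i : Nat) : Int.testBit (Int.ofNat m) i = m.testBit i := rfl

-- Python `-(n+1) % 2**k` = the bitwise complement of n's low k bits, as a Nat.
lemma negSucc_emod_two_pow (n : Nat) (k : Nat) :
    Int.negSucc n % ((2 ^ k : Nat) : Int) = ((2 ^ k - (n % 2 ^ k + 1) : Nat) : Int) := by
  have hp : 0 < 2 ^ k := Nat.two_pow_pos k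
  have hq : n % 2 ^ k < 2 ^ k := Nat.mod_lt _ hp
  have hnd := Nat.mod_add_div n (2 ^ k)
  have hnd' : ((n % 2 ^ k : Nat) : Int) + ((2 ^ k : Nat) : Int) * ((n / 2 ^ k : Nat) : Int)
      = (n : Int) := by exact_mod_cast hnd
  have hsub : ((2 ^ k - (n % 2 ^ k + 1) : Nat) : Int)
      = ((2 ^ k : Nat) : Int) - ((n % 2 ^ k : Nat) : Int) - 1 := by
    have hle : n % 2 ^ k + 1 ≤ 2 ^ k := hq
    push_cast [hle]
    ring
  have hstep : Int.negSucc n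
      = ((2 ^ k - (n % 2 ^ k + 1) : Nat) : Int) + ((2 ^ k : Nat) : Int) * (-((n / 2 ^ k : Nat) : Int) - 1) := by
    rw [Int.negSucc_eq, hsub, ← hnd']
    ring
  rw [hstep, Int.add_mul_emod_self_left]
  exact Int.emod_eq_of_lt (by positivity) (by exact_mod_cast Nat.sub_lt hp (by omega))

-- The low bits of a Python floor-mod by 2^k are the low bits of the argument.
lemma testBit_emod_two_pow (v : Int) (k i : Nat) (hik : i < k) :
    Int.testBit (v % ((2 ^ k : Nat) : Int)) i = v.testBit i := by
  cases v with
  | ofNat n =>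
    have h1 : (Int.ofNat n) % ((2 ^ k : Nat) : Int) = ((n % 2 ^ k : Nat) : Int) := by
      norm_cast
    rw [h1]
    show (n % 2 ^ k).testBit i = n.testBit i
    simp [Nat.testBit_mod_two_pow, hik]
  | negSucc n =>
    rw [negSucc_emod_two_pow]
    show (2 ^ k - (n % 2 ^ k + 1)).testBit i = !n.testBit i
    rw [Nat.testBit_two_pow_sub_succ (Nat.mod_lt _ (Nat.two_pow_pos k))]
    simp [hik, Nat.testBit_mod_two_pow]

-- Python int.bit_length on a positive Nat is log2 + 1, i.e. Nat.size.
lemma size_eq_log2_succ {m : Nat} (hm : m ≠ 0) : Nat.size m = Nat.log2 m + 1 := by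
  have h1 : Nat.size m ≤ Nat.log2 m + 1 := Nat.size_le.mpr (Nat.lt_log2_self)
  have h2 : Nat.log2 m < Nat.size m := Nat.lt_size.mpr (Nat.log2_self_le hm)
  omega

-- Int.land v 2^j vanishes iff bit j of v is clear.
lemma land_two_pow_eq_zero_iff (v : Int) (j : Nat) :
    Int.land v (Int.ofNat (2 ^ j)) = 0 ↔ v.testBit j = false := by
  obtain ⟨m, hm⟩ := land_ofNat_exists v (2 ^ j)
  have htb : ∀ i, m.testBit i = (v.testBit i && decide (j = i)) := by
    intro i
    rw [← testBit_ofNat, ← hm, Int.testBit_land, testBit_ofNat, Nat.testBit_two_pow]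
  constructor
  · intro h
    have hm0 : m = 0 := by
      rw [hm] at h; simpa using h
    have := htb j
    simp [hm0, Nat.zero_testBit] at this
    exact this
  · intro h
    have hm0 : m = 0 := by
      apply Nat.eq_of_testBit_eq
      intro i
      rw [htb i, Nat.zero_testBit]
      by_cases hij : j = i
      · subst hij; simp [h]
      · simp [hij]
    rw [hm, hm0]; rfl

-- The loop specification: starting at count = b - k with mask 2^(k-1), the loop computes
-- b minus the bit length of the low k masked bits (or b if they are all zero).
lemma clzLoopA_spec (v : Int) (b : Nat) (m : Nat)
    (hmb : ∀ i, m.testBit i = (v.testBit i && decide (i < b))) :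
    ∀ (k : Nat), k ≤ b → ∀ (fuel : Nat), k ≤ fuel → ∀ (mask : Int),
      (1 ≤ k → mask = Int.ofNat (2 ^ (k - 1))) →
      clzLoopA v (b : Int) ((b : Int) - (k : Int)) mask fuel =
        (if m % 2 ^ k = 0 then (b : Int) else (b : Int) - (Nat.size (m % 2 ^ k) : Int)) := by
  intro k
  induction k with
  | zero =>
    intro _ fuel _ mask _
    have hcount : ¬ ((b : Int) - (0 : Nat) < (b : Int)) := by simp
    cases fuel with
    | zero => simp [clzLoopA, Nat.mod_one]
    | succ f => simp [clzLoopA, Nat.mod_one]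
  | succ k ih =>
    intro hkb fuel hfuel mask hmask
    obtain ⟨f, rfl⟩ : ∃ f, fuel = f + 1 := ⟨fuel - 1, by omega⟩
    have hmask' : mask = Int.ofNat (2 ^ k) := by simpa using hmask (by omega)
    have hcount : (b : Int) - ((k : Nat) + 1 : Nat) < (b : Int) := by push_cast; omega
    have hbit : v.testBit k = m.testBit k := by
      have := hmb k
      rw [this, decide_eq_true (by omega : k < b), Bool.and_true]
    by_cases hz : m.testBit k = false
    · -- bit clear: the loop steps on
      have hcond : Int.land v mask = 0 := by
        rw [hmask', land_two_pow_eq_zero_iff, hbit]; exact hz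
      have hstep : clzLoopA v (b : Int) ((b : Int) - ((k : Nat) + 1 : Nat)) mask (f + 1)
          = clzLoopA v (b : Int) ((b : Int) - ((k : Nat) + 1 : Nat) + 1) (mask >>> (1 : Int)) f := by
        simp [clzLoopA, hcond]
      have hcnt : (b : Int) - ((k : Nat) + 1 : Nat) + 1 = (b : Int) - (k : Nat) := by
        push_cast; ring
      have hmr : 1 ≤ k → mask >>> (1 : Int) = Int.ofNat (2 ^ (k - 1)) := by
        intro hk1
        rw [hmask']
        have : ((2 ^ k : Nat) : Int) >>> ((1 : Nat) : Int) = (((2 ^ k) >>> 1 : Nat) : Int) :=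
          Int.shiftRight_natCast (2 ^ k) 1
        simp only [Int.ofNat_eq_natCast, Nat.cast_one] at this ⊢
        rw [this]
        congr 1
        have : 2 ^ k = 2 ^ (k - 1) * 2 := by
          rw [← pow_succ]; congr 1; omega
        simp [Nat.shiftRight_eq_div_pow, this]
      have hmod : m % 2 ^ (k + 1) = m % 2 ^ k := by
        apply Nat.eq_of_testBit_eq
        intro i
        rcases Nat.lt_trichotomy i k with h | h | h
        · simp [Nat.testBit_mod_two_pow, h, Nat.lt_succ_of_lt h]
        · subst h; simp [Nat.testBit_mod_two_pow, hz]
        · have h1 : ¬ i < k := by omega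
          have h2 : ¬ i < k + 1 := by omega
          simp [Nat.testBit_mod_two_pow, h1, h2]
      rw [hstep, hcnt, ih (by omega) f (by omega) (mask >>> (1 : Int)) hmr, hmod]
    · -- bit set: the loop stops here
      have hz' : m.testBit k = true := by revert hz; cases m.testBit k <;> simp
      have hcond : ¬ Int.land v mask = 0 := by
        rw [hmask', land_two_pow_eq_zero_iff, hbit, hz']; simp
      have hstop : clzLoopA v (b : Int) ((b : Int) - ((k : Nat) + 1 : Nat)) mask (f + 1)
          = (b : Int) - ((k : Nat) + 1 : Nat) := by
        simp [clzLoopA, hcond]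
      set n := m % 2 ^ (k + 1) with hn
      have hnbit : n.testBit k = true := by
        rw [hn, Nat.testBit_mod_two_pow, decide_eq_true (by omega : k < k + 1), Bool.true_and, hz']
      have hne : n ≠ 0 := by
        intro h0; rw [h0, Nat.zero_testBit] at hnbit; exact Bool.false_ne_true hnbit
      have hsize : Nat.size n = k + 1 := by
        have hlt : n < 2 ^ (k + 1) := Nat.mod_lt _ (Nat.two_pow_pos _)
        have h1 : Nat.size n ≤ k + 1 := Nat.size_le.mpr hlt
        have h2 : k < Nat.size n := by
          rw [Nat.lt_size]
          by_contra hge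
          have : n < 2 ^ k := by omega
          rw [Nat.testBit_lt_two_pow this] at hnbit
          exact Bool.false_ne_true hnbit
        omega
      rw [hstop, if_neg hne, hsize]
  
-- ===== VERDICT (by name: the statement is the Claim_ definition above) =====
theorem count_leading_zeros_py_spec : Claim_equal_count_leading_zeros_py := by
  intro value bits _ hpre
  unfold Spec_count_leading_zeros_py count_leading_zeros_py count_leading_zeros_py_alt
  have hb0 : 0 ≤ bits := by rcases hpre with h | ⟨_, h⟩ <;> omega
  have hpos : (0 : Int) < ((1 <<< bits.toNat : Nat) : Int) := by
    have := Nat.two_pow_pos bits.toNat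
    rw [Nat.shiftLeft_eq, one_mul]
    exact_mod_cast this
  by_cases hv : value = 0
  · subst hv
    rw [PySem.Int.mod_eq_emod_of_pos hpos, Int.zero_emod]
    simp
  · have hb1 : 1 ≤ bits := by
      rcases hpre with h | ⟨h0, _⟩
      · exact h
      · exact absurd h0 hv
    obtain ⟨b, hb⟩ : ∃ b : Nat, bits = (b : Int) := ⟨bits.toNat, (Int.toNat_of_nonneg (by omega)).symm⟩
    subst hb
    have hb1' : 1 ≤ b := by exact_mod_cast hb1
    -- initial mask of A
    have hmaskA : ((1 <<< ((b : Int) - 1).toNat : Nat) : Int) = Int.ofNat (2 ^ (b - 1)) := by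
      have h1 : ((b : Int) - 1).toNat = b - 1 := by omega
      rw [h1]
      simp [Int.ofNat_eq_natCast, Nat.shiftLeft_eq]
    -- B's masked value, as a Nat
    have hshift : ((1 <<< ((b : Int)).toNat : Nat) : Int) = ((2 ^ b : Nat) : Int) := by
      simp [Nat.shiftLeft_eq]
    rw [PySem.Int.mod_eq_emod_of_pos hpos, hshift]
    have hp : (0 : Int) < ((2 ^ b : Nat) : Int) := by exact_mod_cast Nat.two_pow_pos b
    have hr0 : 0 ≤ value % ((2 ^ b : Nat) : Int) := Int.emod_nonneg _ (by omega)
    have hrlt : value % ((2 ^ b : Nat) : Int) < ((2 ^ b : Nat) : Int) := Int.emod_lt_of_pos _ hp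
    obtain ⟨m, hm⟩ : ∃ m : Nat, value % ((2 ^ b : Nat) : Int) = (m : Int) :=
      ⟨(value % ((2 ^ b : Nat) : Int)).toNat, (Int.toNat_of_nonneg hr0).symm⟩
    have hmlt : m < 2 ^ b := by exact_mod_cast hm ▸ hrlt
    have hmb : ∀ i, m.testBit i = (value.testBit i && decide (i < b)) := by
      intro i
      by_cases hib : i < b
      · rw [← testBit_ofNat, show Int.ofNat m = (m : Int) from rfl, ← hm,
          testBit_emod_two_pow value b i hib]
        simp [hib]
      · have hle : 2 ^ b ≤ 2 ^ i := Nat.pow_le_pow_right (by norm_num) (by omega)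
        rw [Nat.testBit_lt_two_pow (by omega)]
        simp [hib]
    have hmm : m % 2 ^ b = m := Nat.mod_eq_of_lt hmlt
    have hloop := clzLoopA_spec value b m hmb b le_rfl ((b : Int).toNat) (by simp) _
      (fun _ => hmaskA)
    have hzero : ((b : Int) - ((b : Nat) : Int)) = 0 := by ring
    rw [hzero] at hloop
    rw [if_neg hv, hloop, hmm]
    simp only [hm]
    by_cases hm0 : m = 0
    · simp [hm0]
    · rw [if_neg hm0, if_neg (by exact_mod_cast hm0), size_eq_log2_succ hm0]
      simp
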